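-- pv_equiv track=rewrite | github.com/mesquitadev/caminho-critico | sgs_caminho_critico/descendentes.py | get_graph_table_records_from_list
-- ===== SOURCE A (Python) =====
-- def get_graph_table_records_from_list(lista):
--     list_edges = []
--     nodes = []
--     for par in lista:
--         elm = (par[0][0],f'{par[0][0]}-{par[0][1]}',par[0][1])
--         if elm not in list_edges: # (par[0][0],f'{par[0][0]}-{par[0][1]}',par[0][1])
--             list_edges.append(elm)
--         elm = (par[0][0],par[0][0])
--         if elm not in nodes:
--             nodes.append(elm)
--         elm = (par[0][1], par[0][1])
--         if elm not in nodes: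
--             nodes.append(elm)
--     return list_edges, nodes
-- ===== SOURCE B (Python) =====
-- def get_graph_table_records_from_list(lista):
--     # pass 1: build deduplicated edge list
--     list_edges = []
--     for par in lista:
--         s, t = par[0]
--         edge = (s, f'{s}-{t}', t)
--         if edge not in list_edges:
--             list_edges.append(edge)
--     # pass 2: derive nodes from the deduplicated edges
--     nodes = []
--     for edge in list_edges:
--         for n in (edge[0], edge[2]):
--             elm = (n, n)
--             if elm not in nodes:
--                 nodes.append(elm)
--     return list_edges, nodes
-- ===== Notes on version B (the rewrite author's own statement) =====
-- stated objective: alternative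
-- what changed: A builds edges and nodes together in one combined pass over lista; B first builds the deduplicated edge list in one pass, then derives the node list in a second pass over the edges themselves (proved order-equivalent because a duplicate edge never introduces a new node).
import Mathlib
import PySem

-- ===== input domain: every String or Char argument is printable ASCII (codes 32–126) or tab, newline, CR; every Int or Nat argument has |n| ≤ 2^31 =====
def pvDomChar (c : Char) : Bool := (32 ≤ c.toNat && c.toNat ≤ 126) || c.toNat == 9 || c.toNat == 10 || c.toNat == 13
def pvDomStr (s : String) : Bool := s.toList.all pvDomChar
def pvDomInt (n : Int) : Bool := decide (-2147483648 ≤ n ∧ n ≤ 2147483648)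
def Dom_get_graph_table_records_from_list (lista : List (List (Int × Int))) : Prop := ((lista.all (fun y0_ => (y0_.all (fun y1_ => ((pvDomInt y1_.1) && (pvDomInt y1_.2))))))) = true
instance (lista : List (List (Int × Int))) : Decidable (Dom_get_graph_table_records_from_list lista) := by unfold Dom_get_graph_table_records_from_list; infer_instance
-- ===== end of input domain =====

-- B splits A's single combined pass into an edge-building pass followed by a node-derivation pass over the edges.

-- ===== PORT A =====
-- the edge tuple (par[0][0], f'{par[0][0]}-{par[0][1]}', par[0][1])
def pvMkEdge (s t : Int) : Int × String × Int :=
  (s, PySem.Int.toStr s ++ "-" ++ PySem.Int.toStr t, t)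

-- `if elm not in nodes: nodes.append(elm)` with elm = (x, x)
def pvAddNode (N : List (Int × Int)) (x : Int) : List (Int × Int) :=
  if (x, x) ∈ N then N else N ++ [(x, x)]

-- A: one combined loop over lista (par[0] raises IndexError on an empty inner
-- list; those inputs are excluded by Pre_, and the empty case here is a skip).
def get_graph_table_records_from_list (lista : List (List (Int × Int))) : (List (Int × String × Int)) × (List (Int × Int)) :=
  lista.foldl (fun st par =>
    match par with
    | [] => st
    | (s, t) :: _ =>
      let e := pvMkEdge s t
      (if e ∈ st.1 then st.1 else st.1 ++ [e], pvAddNode (pvAddNode st.2 s) t))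
    ([], [])

-- ===== PORT B =====
-- B pass 1: build the deduplicated edge list
def pvEdgeStep (E : List (Int × String × Int)) (par : List (Int × Int)) : List (Int × String × Int) :=
  match par with
  | [] => E
  | (s, t) :: _ =>
    let e := pvMkEdge s t
    if e ∈ E then E else E ++ [e]

-- B pass 2 body: the two nodes of an edge
def pvNodeStep (N : List (Int × Int)) (e : Int × String × Int) : List (Int × Int) :=
  pvAddNode (pvAddNode N e.1) e.2.2

def get_graph_table_records_from_list_alt (lista : List (List (Int × Int))) : (List (Int × String × Int)) × (List (Int × Int)) :=
  let list_edges := lista.foldl pvEdgeStep []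
  (list_edges, list_edges.foldl pvNodeStep [])

-- ===== PRECONDITION & SPEC =====
-- Pre_ excludes inputs containing an empty inner list, on which both Pythons raise IndexError at par[0].
def Pre_get_graph_table_records_from_list (lista : List (List (Int × Int))) : Prop :=
  ∀ par ∈ lista, par ≠ []
instance (lista : List (List (Int × Int))) : Decidable (Pre_get_graph_table_records_from_list lista) := by unfold Pre_get_graph_table_records_from_list; infer_instance
def pvWitness_get_graph_table_records_from_list : (List (List (Int × Int))) := [[(1, 2)], [(2, 3)], [(1, 2)]]

def Spec_get_graph_table_records_from_list (lista : List (List (Int × Int))) (out : (List (Int × String × Int)) × (List (Int × Int))) : Prop := out = get_graph_table_records_from_list_alt lista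
instance (lista : List (List (Int × Int))) (out : (List (Int × String × Int)) × (List (Int × Int))) : Decidable (Spec_get_graph_table_records_from_list lista out) := by unfold Spec_get_graph_table_records_from_list; infer_instance

-- ===== CLAIM (what is proved, stated in full; the proofs are below) =====
def Claim_equal_get_graph_table_records_from_list : Prop := ∀ (lista : List (List (Int × Int))), Dom_get_graph_table_records_from_list lista → Pre_get_graph_table_records_from_list lista → Spec_get_graph_table_records_from_list lista (get_graph_table_records_from_list lista)

-- ===== LEMMAS AND PROOFS =====

-- A's node step on a raw pair
def pvPairNodeStep (N : List (Int × Int)) (par : List (Int × Int)) : List (Int × Int) :=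
  match par with
  | [] => N
  | (s, t) :: _ => pvAddNode (pvAddNode N s) t

-- the edges NEWLY appended while folding pvEdgeStep from accumulator E
def pvNewEdges (E : List (Int × String × Int)) : List (List (Int × Int)) → List (Int × String × Int)
  | [] => []
  | par :: rest =>
    match par with
    | [] => pvNewEdges E rest
    | (s, t) :: _ =>
      let e := pvMkEdge s t
      if e ∈ E then pvNewEdges E rest else e :: pvNewEdges (E ++ [e]) rest

theorem pvEdgeFold_eq (l : List (List (Int × Int))) :
    ∀ E, l.foldl pvEdgeStep E = E ++ pvNewEdges E l := by
  induction l with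
  | nil => intro E; simp [pvNewEdges]
  | cons par rest ih =>
    intro E
    match par with
    | [] => simp [pvEdgeStep, pvNewEdges, ih]
    | (s, t) :: tl =>
      by_cases h : pvMkEdge s t ∈ E <;>
        simp [List.foldl_cons, pvEdgeStep, pvNewEdges, h, ih]

theorem pvAFold_eq (l : List (List (Int × Int))) :
    ∀ (E : List (Int × String × Int)) (N : List (Int × Int)),
      l.foldl (fun st par =>
        match par with
        | [] => st
        | (s, t) :: _ =>
          let e := pvMkEdge s t
          (if e ∈ st.1 then st.1 else st.1 ++ [e], pvAddNode (pvAddNode st.2 s) t)) (E, N)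
      = (l.foldl pvEdgeStep E, l.foldl pvPairNodeStep N) := by
  induction l with
  | nil => intro E N; rfl
  | cons par rest ih =>
    intro E N
    match par with
    | [] => simpa [pvEdgeStep, pvPairNodeStep] using ih E N
    | (s, t) :: tl => simpa [pvEdgeStep, pvPairNodeStep] using ih _ _

theorem pvMem_addNode {N : List (Int × Int)} {p : Int × Int} (x : Int) (h : p ∈ N) :
    p ∈ pvAddNode N x := by
  unfold pvAddNode; split <;> simp [h]

theorem pvSelf_mem_addNode (N : List (Int × Int)) (x : Int) :
    (x, x) ∈ pvAddNode N x := by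
  unfold pvAddNode; split <;> simp_all

theorem pvAddNode_mem {N : List (Int × Int)} {x : Int} (h : (x, x) ∈ N) :
    pvAddNode N x = N := by
  unfold pvAddNode; simp [h]

-- invariant: both endpoints of every accumulated edge are already nodes
def pvInv (E : List (Int × String × Int)) (N : List (Int × Int)) : Prop :=
  ∀ e ∈ E, (e.1, e.1) ∈ N ∧ (e.2.2, e.2.2) ∈ N

theorem pvNodes_eq (l : List (List (Int × Int))) :
    ∀ (E : List (Int × String × Int)) (N : List (Int × Int)), pvInv E N →
      l.foldl pvPairNodeStep N = (pvNewEdges E l).foldl pvNodeStep N := by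
  induction l with
  | nil => intro E N _; simp [pvNewEdges]
  | cons par rest ih =>
    intro E N hInv
    match par with
    | [] => simpa [pvPairNodeStep, pvNewEdges] using ih E N hInv
    | (s, t) :: tl =>
      by_cases h : pvMkEdge s t ∈ E
      · have hs : (s, s) ∈ N := (hInv _ h).1
        have ht : (t, t) ∈ N := (hInv _ h).2
        have : pvAddNode (pvAddNode N s) t = N := by
          rw [pvAddNode_mem hs, pvAddNode_mem ht]
        simp only [List.foldl_cons, pvPairNodeStep, pvNewEdges, h, if_true, this]
        exact ih E N hInv
      · have hInv' : pvInv (E ++ [pvMkEdge s t]) (pvAddNode (pvAddNode N s) t) := by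
          intro e he
          rcases List.mem_append.1 he with he | he
          · obtain ⟨h1, h2⟩ := hInv e he
            exact ⟨pvMem_addNode t (pvMem_addNode s h1), pvMem_addNode t (pvMem_addNode s h2)⟩
          · simp at he
            subst he
            refine ⟨pvMem_addNode t (pvSelf_mem_addNode N s), ?_⟩
            exact pvSelf_mem_addNode _ t
        simp only [List.foldl_cons, pvPairNodeStep, pvNewEdges, h, if_false]
        simpa [pvNodeStep] using ih _ _ hInv'

-- ===== VERDICT (by name: the statement is the Claim_ definition above) =====
theorem get_graph_table_records_from_list_spec : Claim_equal_get_graph_table_records_from_list := by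
  intro lista _ _
  unfold Spec_get_graph_table_records_from_list get_graph_table_records_from_list
    get_graph_table_records_from_list_alt
  rw [pvAFold_eq]
  have h1 : lista.foldl pvEdgeStep [] = pvNewEdges [] lista := by
    simpa using pvEdgeFold_eq lista []
  have h2 : lista.foldl pvPairNodeStep [] = (pvNewEdges [] lista).foldl pvNodeStep [] :=
    pvNodes_eq lista [] [] (by intro e he; simp at he)
  rw [h1, h2]
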